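-- pv_equiv track=rewrite | github.com/ayhem18/pytorch_modular | src/mypt/building_blocks/conv_blocks/conv_block_design/contracting_designer.py | _split_into_sub_blocks
-- ===== SOURCE A (Python) =====
-- from typing import Dict, List, OrderedDict, Tuple
--
-- def _split_into_sub_blocks(block: List[Dict]) -> List[List[Dict]]:
--     """
--     Split a block into sub-blocks based on layer types.
--     A sub-block is defined as a sequence of convolutions followed by a pooling layer.
--
--     Args:
--         block: List of layer dictionaries from contracting_helper
--
--     Returns:
--         List of sub-blocks, where each sub-block is a list of layer dicts
--     """
--     sub_blocks = []
--     current_sub_block = []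
--
--     for layer in block:
--         if layer["type"] == "conv":
--             current_sub_block.append(layer)
--         elif layer["type"] == "pool":
--             # Add pool layer to current sub-block and start a new sub-block
--             current_sub_block.append(layer)
--             sub_blocks.append(current_sub_block)
--             current_sub_block = []
--
--     # Add any remaining layers as the final sub-block
--     if current_sub_block:
--         sub_blocks.append(current_sub_block)
--
--     return sub_blocks
-- ===== SOURCE B (Python) =====
-- def _split_into_sub_blocks(block):
--     """Two-phase: filter to conv/pool layers and record pool boundary positions,
--     then build sub-blocks by slicing between consecutive boundaries."""
--     filtered = [layer for layer in block if layer["type"] in ("conv", "pool")]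
--     bounds = [i + 1 for i, layer in enumerate(filtered) if layer["type"] == "pool"]
--     sub_blocks = []
--     prev = 0
--     for b in bounds:
--         sub_blocks.append(filtered[prev:b])
--         prev = b
--     if prev < len(filtered):
--         sub_blocks.append(filtered[prev:])
--     return sub_blocks
-- ===== Notes on version B (the rewrite author's own statement) =====
-- stated objective: alternative
-- what changed: Replaces the single-pass accumulator that is flushed at each pool layer by a two-phase structure: one pass filters to conv/pool layers and records pool boundary positions, then the result is built by slicing the filtered list between consecutive boundaries, appending the tail slice only if non-empty.
import Mathlib
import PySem

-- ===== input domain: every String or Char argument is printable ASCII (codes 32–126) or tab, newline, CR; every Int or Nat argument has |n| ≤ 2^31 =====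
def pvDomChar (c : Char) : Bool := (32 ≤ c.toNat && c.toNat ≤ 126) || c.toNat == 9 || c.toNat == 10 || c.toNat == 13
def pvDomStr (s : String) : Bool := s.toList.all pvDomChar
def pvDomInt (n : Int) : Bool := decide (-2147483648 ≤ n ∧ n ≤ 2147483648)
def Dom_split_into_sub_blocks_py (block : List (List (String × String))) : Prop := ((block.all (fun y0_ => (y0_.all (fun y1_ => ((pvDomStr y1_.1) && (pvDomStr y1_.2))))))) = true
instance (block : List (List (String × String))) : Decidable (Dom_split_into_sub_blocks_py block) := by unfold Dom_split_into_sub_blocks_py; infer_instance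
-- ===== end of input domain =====

-- B replaces A's in-line flushed accumulator by a two-phase build (filter to conv/pool, collect pool
-- boundary positions, slice between boundaries); same cost, different decomposition.


-- layer["type"]: first match in the association list; Pre_ guarantees the key exists (KeyError otherwise),
-- so the "" default is never consulted on admitted inputs.
def pvTypeOf (layer : List (String × String)) : String :=
  ((layer.find? (fun p => p.1 == "type")).map (·.2)).getD ""

-- ===== PORT A =====
def split_into_sub_blocks_py (block : List (List (String × String))) : List (List (List (String × String))) :=
  let st := block.foldl
    (fun (st : List (List (List (String × String))) × List (List (String × String))) layer =>
      if pvTypeOf layer = "conv" then (st.1, st.2 ++ [layer])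
      else if pvTypeOf layer = "pool" then (st.1 ++ [st.2 ++ [layer]], [])
      else st)
    ([], [])
  if st.2.isEmpty then st.1 else st.1 ++ [st.2]

-- ===== PORT B =====
def split_into_sub_blocks_py_alt (block : List (List (String × String))) : List (List (List (String × String))) :=
  let filtered := block.filter (fun layer => pvTypeOf layer == "conv" || pvTypeOf layer == "pool")
  let bounds := (PySem.List.enumerate filtered 0).filterMap
    (fun p => if pvTypeOf p.2 = "pool" then some (p.1 + 1) else none)
  let st := bounds.foldl
    (fun (st : List (List (List (String × String))) × Int) b =>
      (st.1 ++ [PySem.List.slice filtered (some st.2) (some b)], b))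
    ([], 0)
  if st.2 < (filtered.length : Int) then st.1 ++ [PySem.List.slice filtered (some st.2) none] else st.1

-- ===== PRECONDITION & SPEC =====
-- Pre_ excludes exactly the layers without a "type" key, on which both Pythons raise KeyError.
def Pre_split_into_sub_blocks_py (block : List (List (String × String))) : Prop :=
  ∀ layer ∈ block, (layer.find? (fun p => p.1 == "type")).isSome = true
instance (block : List (List (String × String))) : Decidable (Pre_split_into_sub_blocks_py block) := by unfold Pre_split_into_sub_blocks_py; infer_instance

def pvWitness_split_into_sub_blocks_py : (List (List (String × String))) :=
  [[("type", "conv")], [("type", "pool")], [("type", "conv")]]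

def Spec_split_into_sub_blocks_py (block : List (List (String × String))) (out : List (List (List (String × String)))) : Prop := out = split_into_sub_blocks_py_alt block
instance (block : List (List (String × String))) (out : List (List (List (String × String)))) : Decidable (Spec_split_into_sub_blocks_py block out) := by unfold Spec_split_into_sub_blocks_py; infer_instance

-- ===== CLAIM (what is proved, stated in full; the proofs are below) =====
def Claim_equal_split_into_sub_blocks_py : Prop := ∀ (block : List (List (String × String))), Dom_split_into_sub_blocks_py block → Pre_split_into_sub_blocks_py block → Spec_split_into_sub_blocks_py block (split_into_sub_blocks_py block)

-- ===== LEMMAS AND PROOFS =====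

-- canonical grouping of the filtered (conv/pool-only) list
def pvConsFirst (l : List (String × String)) (gs : List (List (List (String × String)))) : List (List (List (String × String))) :=
  match gs with
  | [] => [[l]]
  | g :: gs => (l :: g) :: gs

def pvGroup : List (List (String × String)) → List (List (List (String × String)))
  | [] => []
  | l :: ls => if pvTypeOf l = "pool" then [l] :: pvGroup ls else pvConsFirst l (pvGroup ls)

-- A-side characterisation ------------------------------------------------
def pvH (cur : List (List (String × String))) (gs : List (List (List (String × String)))) : List (List (List (String × String))) :=
  match gs with
  | [] => if cur.isEmpty then [] else [cur]
  | g :: gs => (cur ++ g) :: gs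

lemma pvH_nil (gs : List (List (List (String × String)))) : pvH [] gs = gs := by
  cases gs <;> simp [pvH]

lemma pvH_snoc (cur : List (List (String × String))) (l : List (String × String))
    (gs : List (List (List (String × String)))) :
    pvH (cur ++ [l]) gs = pvH cur (pvConsFirst l gs) := by
  cases gs <;> simp [pvH, pvConsFirst]

lemma pvA_inv (xs : List (List (String × String)))
    (acc : List (List (List (String × String)))) (cur : List (List (String × String))) :
    (let st := xs.foldl
        (fun (st : List (List (List (String × String))) × List (List (String × String))) layer =>
          if pvTypeOf layer = "conv" then (st.1, st.2 ++ [layer])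
          else if pvTypeOf layer = "pool" then (st.1 ++ [st.2 ++ [layer]], [])
          else st)
        (acc, cur)
      if st.2.isEmpty then st.1 else st.1 ++ [st.2])
    = acc ++ pvH cur (pvGroup (xs.filter (fun layer => pvTypeOf layer == "conv" || pvTypeOf layer == "pool"))) := by
  induction xs generalizing acc cur with
  | nil => cases cur <;> simp [pvH, pvGroup]
  | cons l ls ih =>
    by_cases hc : pvTypeOf l = "conv"
    · simp only [List.foldl_cons, List.filter_cons, hc, if_pos]
      rw [ih]
      simp [pvGroup, hc, pvH_snoc]
    · by_cases hp : pvTypeOf l = "pool"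
      · have hfc : List.filter (fun layer => pvTypeOf layer == "conv" || pvTypeOf layer == "pool") (l :: ls)
            = l :: List.filter (fun layer => pvTypeOf layer == "conv" || pvTypeOf layer == "pool") ls := by
          simp [hp]
        rw [List.foldl_cons, if_neg hc, if_pos hp, ih, pvH_nil, hfc]
        simp [pvGroup, hp, pvH]
      · simp only [List.foldl_cons, List.filter_cons, hc, hp]
        rw [ih]
        simp [hc, hp]

lemma pvA_eq (block : List (List (String × String))) :
    split_into_sub_blocks_py block
    = pvGroup (block.filter (fun layer => pvTypeOf layer == "conv" || pvTypeOf layer == "pool")) := by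
  unfold split_into_sub_blocks_py
  rw [pvA_inv block [] [], pvH_nil]
  simp

-- B-side characterisation ------------------------------------------------
def pvBoundsN : List (List (String × String)) → Nat → List Nat
  | [], _ => []
  | l :: ls, i => if pvTypeOf l = "pool" then (i + 1) :: pvBoundsN ls (i + 1) else pvBoundsN ls (i + 1)

def pvChunks (fl : List (List (String × String))) : List Nat → Nat → List (List (List (String × String)))
  | [], prev => if prev < fl.length then [fl.drop prev] else []
  | b :: bs, prev => (fl.drop prev).take (b - prev) :: pvChunks fl bs b

lemma pvBounds_eq (fl : List (List (String × String))) (i : Nat) :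
    (PySem.List.enumerate fl (Int.ofNat i)).filterMap
      (fun p => if pvTypeOf p.2 = "pool" then some (p.1 + 1) else none)
    = (pvBoundsN fl i).map Int.ofNat := by
  induction fl generalizing i with
  | nil => simp [PySem.List.enumerate_nil, pvBoundsN]
  | cons l ls ih =>
    rw [PySem.List.enumerate_cons]
    have h1 : Int.ofNat i + 1 = Int.ofNat (i + 1) := by
      simp [Int.ofNat_eq_natCast]
    simp only [List.filterMap_cons, h1, ih (i + 1)]
    by_cases hp : pvTypeOf l = "pool" <;> simp [pvBoundsN, hp]

lemma pvBounds_eq0 (fl : List (List (String × String))) :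
    (PySem.List.enumerate fl 0).filterMap
      (fun p => if pvTypeOf p.2 = "pool" then some (p.1 + 1) else none)
    = (pvBoundsN fl 0).map Int.ofNat := by
  have h := pvBounds_eq fl 0
  rwa [show Int.ofNat 0 = (0 : Int) from rfl] at h

lemma pvFold_eq (fl : List (List (String × String))) (bs : List Nat)
    (acc : List (List (List (String × String)))) (prev : Nat) :
    (if ((bs.map Int.ofNat).foldl
          (fun (st : List (List (List (String × String))) × Int) b =>
            (st.1 ++ [PySem.List.slice fl (some st.2) (some b)], b))
          (acc, Int.ofNat prev)).2 < (fl.length : Int)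
     then ((bs.map Int.ofNat).foldl
          (fun (st : List (List (List (String × String))) × Int) b =>
            (st.1 ++ [PySem.List.slice fl (some st.2) (some b)], b))
          (acc, Int.ofNat prev)).1
          ++ [PySem.List.slice fl (some ((bs.map Int.ofNat).foldl
                (fun (st : List (List (List (String × String))) × Int) b =>
                  (st.1 ++ [PySem.List.slice fl (some st.2) (some b)], b))
                (acc, Int.ofNat prev)).2) none]
     else ((bs.map Int.ofNat).foldl
          (fun (st : List (List (List (String × String))) × Int) b =>
            (st.1 ++ [PySem.List.slice fl (some st.2) (some b)], b))
          (acc, Int.ofNat prev)).1)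
    = acc ++ pvChunks fl bs prev := by
  induction bs generalizing acc prev with
  | nil =>
    simp only [List.map_nil, List.foldl_nil, pvChunks, Int.ofNat_eq_natCast,
      PySem.List.slice_from_natCast, Nat.cast_lt]
    by_cases h : prev < fl.length <;> simp [h]
  | cons b bs ih =>
    simp only [List.map_cons, List.foldl_cons]
    rw [ih]
    simp [pvChunks, Int.ofNat_eq_natCast, PySem.List.slice_natCast]

lemma pvChunks_shift (l : List (String × String)) (ls : List (List (String × String)))
    (bs : List Nat) (prev : Nat) :
    pvChunks (l :: ls) (bs.map (· + 1)) (prev + 1) = pvChunks ls bs prev := by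
  induction bs generalizing prev with
  | nil => simp [pvChunks]
  | cons b bs ih => simp [pvChunks, ih, Nat.succ_sub_succ]

lemma pvBoundsN_succ (ls : List (List (String × String))) (i : Nat) :
    pvBoundsN ls (i + 1) = (pvBoundsN ls i).map (· + 1) := by
  induction ls generalizing i with
  | nil => simp [pvBoundsN]
  | cons l ls ih =>
    by_cases hp : pvTypeOf l = "pool" <;> simp [pvBoundsN, hp, ih]

lemma pvChunks_zero_cons (l : List (String × String)) (ls : List (List (String × String)))
    (bs : List Nat) :
    pvChunks (l :: ls) (bs.map (· + 1)) 0 = pvConsFirst l (pvChunks ls bs 0) := by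
  cases bs with
  | nil => cases ls <;> simp [pvChunks, pvConsFirst]
  | cons b bs =>
    have h := pvChunks_shift l ls bs b
    simp [pvChunks, pvConsFirst, h]

lemma pvChunks_group (fl : List (List (String × String))) :
    pvChunks fl (pvBoundsN fl 0) 0 = pvGroup fl := by
  induction fl with
  | nil => simp [pvChunks, pvBoundsN, pvGroup]
  | cons l ls ih =>
    by_cases hp : pvTypeOf l = "pool"
    · have h1 : pvBoundsN (l :: ls) 0 = 1 :: (pvBoundsN ls 0).map (· + 1) := by
        simp [pvBoundsN, hp, pvBoundsN_succ]
      rw [h1]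
      show (List.take 1 (l :: ls)) :: pvChunks (l :: ls) ((pvBoundsN ls 0).map (· + 1)) 1 = _
      rw [pvChunks_shift l ls (pvBoundsN ls 0) 0, ih]
      simp [pvGroup, hp]
    · have h1 : pvBoundsN (l :: ls) 0 = (pvBoundsN ls 0).map (· + 1) := by
        simp [pvBoundsN, hp, pvBoundsN_succ]
      rw [h1, pvChunks_zero_cons, ih]
      simp [pvGroup, hp]

lemma pvAlt_eq (block : List (List (String × String))) :
    split_into_sub_blocks_py_alt block
    = pvGroup (block.filter (fun layer => pvTypeOf layer == "conv" || pvTypeOf layer == "pool")) := by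
  simp only [split_into_sub_blocks_py_alt]
  rw [pvBounds_eq0]
  have h := pvFold_eq (block.filter (fun layer => pvTypeOf layer == "conv" || pvTypeOf layer == "pool"))
    (pvBoundsN (block.filter (fun layer => pvTypeOf layer == "conv" || pvTypeOf layer == "pool")) 0) [] 0
  rw [show Int.ofNat 0 = (0 : Int) from rfl] at h
  rw [h, pvChunks_group]
  simp

-- ===== VERDICT (by name: the statement is the Claim_ definition above) =====
theorem split_into_sub_blocks_py_spec : Claim_equal_split_into_sub_blocks_py := by
  intro block _ _
  show split_into_sub_blocks_py block = split_into_sub_blocks_py_alt block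
  rw [pvA_eq, pvAlt_eq]
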